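-- pv_equiv track=rewrite | github.com/anarkiwi/desidulate | sidlib.py | remove_end_repeats
-- ===== SOURCE A (Python) =====
-- def remove_end_repeats(waveforms):
--     repeat_len = int(len(waveforms) / 2)
--     if repeat_len > 1:
--         repeat_range = [i for i in reversed(range(repeat_len + 1)) if i > 1]
--         for lookback in repeat_range:
--             while len(waveforms) >= lookback * 2:
--                 if waveforms[-lookback:] != waveforms[-(lookback*2):-lookback]:
--                     break
--                 waveforms = waveforms[:-lookback]
--     return waveforms
-- ===== SOURCE B (Python) =====
-- def remove_end_repeats(waveforms):
--     ws = waveforms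
--     for lookback in range(len(waveforms) // 2, 1, -1):
--         n = len(ws)
--         if n >= 2 * lookback:
--             tail = ws[n - lookback:]
--             j = n - lookback
--             while j >= lookback and ws[j - lookback:j] == tail:
--                 j -= lookback
--             ws = ws[:j + lookback]
--     return ws
-- ===== Notes on version B (the rewrite author's own statement) =====
-- stated objective: alternative
-- what changed: For each period length B locates the truncation point by stepping an index down while each block equals the fixed terminal block and slices the list once, instead of A's repeated chop-and-recopy of the whole list with adjacent-block slice comparisons.
import Mathlib
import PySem

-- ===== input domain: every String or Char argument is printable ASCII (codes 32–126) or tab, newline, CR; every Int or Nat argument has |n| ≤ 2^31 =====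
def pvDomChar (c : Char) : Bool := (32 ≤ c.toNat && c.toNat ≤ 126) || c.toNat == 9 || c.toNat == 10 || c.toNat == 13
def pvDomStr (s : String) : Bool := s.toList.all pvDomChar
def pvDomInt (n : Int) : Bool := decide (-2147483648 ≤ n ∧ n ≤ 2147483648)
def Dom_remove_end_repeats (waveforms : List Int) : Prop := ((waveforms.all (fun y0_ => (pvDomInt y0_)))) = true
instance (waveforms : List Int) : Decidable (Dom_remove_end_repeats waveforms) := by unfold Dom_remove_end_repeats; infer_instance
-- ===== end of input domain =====

-- B strips the trailing periodic repeats by scanning an index down against the fixed terminal block and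
-- truncating once per period length, instead of A's repeated chop-and-reslice (objective: alternative).

-- ===== PORT A =====
-- A's inner `while` loop as fuel recursion (fuel = current length is enough: each pass removes lb ≥ 2 elements)
def aChop : Nat → Int → List Int → List Int
  | 0, _, ws => ws
  | f+1, lb, ws =>
    if lb * 2 ≤ (ws.length : Int) then
      if PySem.List.slice ws (some (-lb)) none ≠ PySem.List.slice ws (some (-(lb*2))) (some (-lb)) then ws
      else aChop f lb (PySem.List.slice ws none (some (-lb)))
    else ws

-- int(len(waveforms) / 2) equals len(waveforms) // 2 exactly: the length is a nonnegative int far below 2^53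
def remove_end_repeats (waveforms : List Int) : List Int :=
  let repeat_len : Int := PySem.Int.floordiv (waveforms.length : Int) 2
  if repeat_len > 1 then
    let repeat_range := ((PySem.List.pyRange 0 (repeat_len + 1) 1).reverse).filter (fun i => decide (i > 1))
    repeat_range.foldl (fun ws lookback => aChop ws.length lookback ws) waveforms
  else waveforms

-- ===== PORT B =====
-- B's inner `while`: scan j downward while the block ending at j equals the fixed tail (fuel = length)
def bScan : Nat → List Int → List Int → Int → Int → Int
  | 0, _, _, _, j => j
  | f+1, ws, tail, lb, j =>
    if lb ≤ j ∧ PySem.List.slice ws (some (j - lb)) (some j) = tail then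
      bScan f ws tail lb (j - lb)
    else j

-- B's loop body for one lookback value
def stepB (lookback : Int) (ws : List Int) : List Int :=
  let n : Int := (ws.length : Int)
  if 2 * lookback ≤ n then
    let tail := PySem.List.slice ws (some (n - lookback)) none
    let j := bScan ws.length ws tail lookback (n - lookback)
    PySem.List.slice ws none (some (j + lookback))
  else ws

def remove_end_repeats_alt (waveforms : List Int) : List Int :=
  (PySem.List.pyRange (PySem.Int.floordiv (waveforms.length : Int) 2) 1 (-1)).foldl
    (fun ws lookback => stepB lookback ws) waveforms

-- ===== PRECONDITION & SPEC =====
def Spec_remove_end_repeats (waveforms : List Int) (out : List Int) : Prop := out = remove_end_repeats_alt waveforms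
instance (waveforms : List Int) (out : List Int) : Decidable (Spec_remove_end_repeats waveforms out) := by unfold Spec_remove_end_repeats; infer_instance

-- ===== CLAIM (what is proved, stated in full; the proofs are below) =====
def Claim_equal_remove_end_repeats : Prop := ∀ (waveforms : List Int), Dom_remove_end_repeats waveforms → Spec_remove_end_repeats waveforms (remove_end_repeats waveforms)

-- ===== LEMMAS AND PROOFS =====

theorem aChop_stop (f : Nat) (lb : Int) (ws : List Int) (h : ¬ lb * 2 ≤ (ws.length : Int)) :
    aChop f lb ws = ws := by
  cases f with
  | zero => rfl
  | succ f => simp only [aChop, if_neg h]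

theorem aChop_break (f : Nat) (lb : Int) (ws : List Int) (hlen : lb * 2 ≤ (ws.length : Int))
    (hne : PySem.List.slice ws (some (-lb)) none ≠ PySem.List.slice ws (some (-(lb*2))) (some (-lb))) :
    aChop (f+1) lb ws = ws := by
  simp only [aChop, if_pos hlen, if_pos hne]

theorem aChop_step (f : Nat) (lb : Int) (ws : List Int) (hlen : lb * 2 ≤ (ws.length : Int))
    (heq : PySem.List.slice ws (some (-lb)) none = PySem.List.slice ws (some (-(lb*2))) (some (-lb))) :
    aChop (f+1) lb ws = aChop f lb (PySem.List.slice ws none (some (-lb))) := by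
  simp only [aChop, if_pos hlen, if_neg (not_not.mpr heq)]

theorem bScan_stop (f : Nat) (ws tail : List Int) (lb j : Int)
    (h : ¬ (lb ≤ j ∧ PySem.List.slice ws (some (j - lb)) (some j) = tail)) :
    bScan f ws tail lb j = j := by
  cases f with
  | zero => rfl
  | succ f => simp only [bScan, if_neg h]

theorem bScan_step (f : Nat) (ws tail : List Int) (lb j : Int)
    (h : lb ≤ j ∧ PySem.List.slice ws (some (j - lb)) (some j) = tail) :
    bScan (f+1) ws tail lb j = bScan f ws tail lb (j - lb) := by
  simp only [bScan, if_pos h]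

theorem bScan_go (f : Nat) (ws tail : List Int) (lb j : Int) (hf : 0 < f)
    (h : lb ≤ j ∧ PySem.List.slice ws (some (j - lb)) (some j) = tail) :
    bScan f ws tail lb j = bScan (f-1) ws tail lb (j - lb) := by
  cases f with
  | zero => exact absurd hf (lt_irrefl 0)
  | succ f => simp only [bScan, if_pos h, Nat.add_sub_cancel]

theorem bScan_le (f : Nat) (ws tail : List Int) (lb : Int) (hlb : 0 ≤ lb) :
    ∀ j : Int, bScan f ws tail lb j ≤ j := by
  induction f with
  | zero => intro j; simp [bScan]
  | succ f ih =>
    intro j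
    by_cases h : lb ≤ j ∧ PySem.List.slice ws (some (j - lb)) (some j) = tail
    · rw [bScan_step f ws tail lb j h]
      exact le_trans (ih (j - lb)) (by omega)
    · rw [bScan_stop _ ws tail lb j h]

theorem bScan_nonneg (f : Nat) (ws tail : List Int) (lb : Int) :
    ∀ j : Int, 0 ≤ j → 0 ≤ bScan f ws tail lb j := by
  induction f with
  | zero => intro j hj; simpa [bScan] using hj
  | succ f ih =>
    intro j hj
    by_cases h : lb ≤ j ∧ PySem.List.slice ws (some (j - lb)) (some j) = tail
    · rw [bScan_step f ws tail lb j h]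
      exact ih (j - lb) (by omega)
    · rw [bScan_stop _ ws tail lb j h]; exact hj

-- xs[-m:-k] as drop/take (0 < k ≤ m ≤ |xs|)
theorem slice_negneg (ws : List Int) (m k : Nat) (hk : 0 < k) (hkm : k ≤ m) (hmn : m ≤ ws.length) :
    PySem.List.slice ws (some (-(m:Int))) (some (-(k:Int))) = (ws.drop (ws.length - m)).take (m - k) := by
  have hm : 0 < m := lt_of_lt_of_le hk hkm
  simp only [PySem.List.slice, PySem.List.clampIdx_neg_natCast _ _ hk, PySem.List.clampIdx_neg_natCast _ _ hm]
  congr 1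
  omega

-- ws[a:b] inside a prefix that contains it
theorem slice_take_prefix (ws : List Int) (m a b : Nat) (hab : a ≤ b) (hbm : b ≤ m) :
    PySem.List.slice (ws.take m) (some (a:Int)) (some (b:Int)) = PySem.List.slice ws (some (a:Int)) (some (b:Int)) := by
  rw [PySem.List.slice_natCast, PySem.List.slice_natCast, List.drop_take, List.take_take]
  congr 1
  omega

-- scanning a list and scanning its (long enough) prefix agree, for any sufficient fuels
theorem bScan_transfer (ws tail : List Int) (k : Nat) (hk : 2 ≤ k) :
    ∀ (fa fb : Nat) (j : Int), 0 ≤ j → j + (k:Int) ≤ ((ws.length - k : Nat):Int) →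
      j.toNat ≤ fa → j.toNat ≤ fb →
      bScan fa ws tail (k:Int) j = bScan fb (ws.take (ws.length - k)) tail (k:Int) j := by
  intro fa
  induction fa with
  | zero =>
    intro fb j hj0 hjb hfa hfb
    have hj : j = 0 := by omega
    subst hj
    rw [bScan_stop fb _ tail (k:Int) 0 (by intro h; omega)]
    rfl
  | succ fa ih =>
    intro fb j hj0 hjb hfa hfb
    by_cases hkj : (k:Int) ≤ j
    · obtain ⟨jn, rfl⟩ : ∃ jn : Nat, j = (jn:Int) := ⟨j.toNat, by omega⟩
      have hsl : PySem.List.slice (ws.take (ws.length - k)) (some ((jn:Int) - (k:Int))) (some (jn:Int))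
          = PySem.List.slice ws (some ((jn:Int) - (k:Int))) (some (jn:Int)) := by
        have h1 : (jn:Int) - (k:Int) = ((jn - k : Nat):Int) := by omega
        rw [h1, slice_take_prefix ws (ws.length - k) (jn - k) jn (by omega) (by omega)]
      by_cases hc : (k:Int) ≤ (jn:Int) ∧ PySem.List.slice ws (some ((jn:Int) - (k:Int))) (some (jn:Int)) = tail
      · have hc' : (k:Int) ≤ (jn:Int) ∧ PySem.List.slice (ws.take (ws.length - k)) (some ((jn:Int) - (k:Int))) (some (jn:Int)) = tail := by
          rw [hsl]; exact hc
        obtain ⟨fb', rfl⟩ : ∃ fb', fb = fb' + 1 := ⟨fb - 1, by omega⟩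
        rw [bScan_step fa ws tail (k:Int) (jn:Int) hc, bScan_step fb' _ tail (k:Int) (jn:Int) hc']
        exact ih fb' ((jn:Int) - (k:Int)) (by omega) (by omega) (by omega) (by omega)
      · have hc' : ¬ ((k:Int) ≤ (jn:Int) ∧ PySem.List.slice (ws.take (ws.length - k)) (some ((jn:Int) - (k:Int))) (some (jn:Int)) = tail) := by
          rw [hsl]; exact hc
        rw [bScan_stop _ ws tail (k:Int) (jn:Int) hc, bScan_stop _ _ tail (k:Int) (jn:Int) hc']
    · rw [bScan_stop _ ws tail (k:Int) j (by intro h; exact hkj h.1),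
          bScan_stop _ _ tail (k:Int) j (by intro h; exact hkj h.1)]

-- one chop preserves B's step result: stepB of ws equals stepB of ws minus its last block
theorem step_take (ws : List Int) (k : Nat) (hk : 2 ≤ k) (h2k : 2 * k ≤ ws.length)
    (C : ws.drop (ws.length - k) = (ws.drop (ws.length - 2*k)).take k) :
    stepB (k:Int) ws = stepB (k:Int) (ws.take (ws.length - k)) := by
  set n := ws.length with hn'
  have htail : PySem.List.slice ws (some ((n:Int) - (k:Int))) none = ws.drop (n - k) := by
    have h1 : (n:Int) - (k:Int) = ((n - k : Nat):Int) := by omega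
    rw [h1, PySem.List.slice_from_natCast]
  have hlen' : (ws.take (n - k)).length = n - k := by
    simp [List.length_take]; omega
  rw [stepB]
  simp only [← hn']
  rw [if_pos (by omega : 2 * (k:Int) ≤ (n:Int)), htail]
  have hblock : PySem.List.slice ws (some (((n:Int) - (k:Int)) - (k:Int))) (some ((n:Int) - (k:Int)))
      = ws.drop (n - k) := by
    have h1 : ((n:Int) - (k:Int)) - (k:Int) = ((n - 2*k : Nat):Int) := by omega
    have h2 : (n:Int) - (k:Int) = ((n - k : Nat):Int) := by omega
    rw [h1, h2, PySem.List.slice_natCast, C]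
    congr 1
    omega
  rw [bScan_go n ws (ws.drop (n-k)) (k:Int) ((n:Int) - (k:Int)) (by omega) ⟨by omega, hblock⟩]
  have hstart : (n:Int) - (k:Int) - (k:Int) = ((n - 2*k : Nat):Int) := by omega
  rw [hstart]
  rw [stepB]
  simp only [hlen']
  by_cases h3k : 3 * k ≤ n
  · rw [if_pos (by omega)]
    have htail' : PySem.List.slice (ws.take (n-k)) (some (((n-k:Nat):Int) - (k:Int))) none
        = ws.drop (n - k) := by
      have h1 : ((n-k:Nat):Int) - (k:Int) = ((n - 2*k : Nat):Int) := by omega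
      rw [h1, PySem.List.slice_from_natCast, List.drop_take, C]
      congr 1
      omega
    rw [htail']
    have hstart' : ((n-k:Nat):Int) - (k:Int) = ((n - 2*k : Nat):Int) := by omega
    rw [hstart']
    have hscan := bScan_transfer ws (ws.drop (n-k)) k hk (n-1) (n-k) ((n - 2*k : Nat):Int)
      (by omega) (by omega) (by omega) (by omega)
    rw [← hscan]
    set j := bScan (n-1) ws (ws.drop (n-k)) (k:Int) ((n - 2*k : Nat):Int) with hj
    have hj0 : 0 ≤ j := bScan_nonneg (n-1) ws (ws.drop (n-k)) (k:Int) _ (by omega)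
    have hjle : j ≤ ((n - 2*k : Nat):Int) := bScan_le (n-1) ws (ws.drop (n-k)) (k:Int) (by omega) _
    rw [PySem.List.slice_to ws (by omega : (0:Int) ≤ j + (k:Int)),
        PySem.List.slice_to (ws.take (n-k)) (by omega : (0:Int) ≤ j + (k:Int)),
        List.take_take]
    congr 1
    omega
  · rw [if_neg (by omega)]
    rw [bScan_stop _ ws (ws.drop (n-k)) (k:Int) ((n - 2*k : Nat):Int) (by intro h; omega)]
    rw [PySem.List.slice_to ws (by omega : (0:Int) ≤ ((n - 2*k : Nat):Int) + (k:Int))]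
    congr 1
    omega

-- main per-lookback lemma: A's while loop equals B's scan-and-truncate step
theorem main_chop (k : Nat) (hk : 2 ≤ k) :
    ∀ (f : Nat) (ws : List Int), ws.length ≤ f → aChop f (k:Int) ws = stepB (k:Int) ws := by
  intro f
  induction f with
  | zero =>
    intro ws hw
    have : ws = [] := List.length_eq_zero_iff.mp (by omega)
    subst this
    rw [stepB]
    simp only [List.length_nil]
    rw [if_neg (by omega)]
    rfl
  | succ f ih =>
    intro ws hw
    set n := ws.length with hn
    by_cases hlen : (k:Int) * 2 ≤ (n:Int)
    · by_cases hne : PySem.List.slice ws (some (-(k:Int))) none ≠ PySem.List.slice ws (some (-((k:Int)*2))) (some (-(k:Int)))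
      · rw [aChop_break f (k:Int) ws (by omega) hne]
        rw [stepB]
        simp only [← hn]
        rw [if_pos (by omega)]
        have htail : PySem.List.slice ws (some ((n:Int) - (k:Int))) none = ws.drop (n - k) := by
          have h1 : (n:Int) - (k:Int) = ((n - k : Nat):Int) := by omega
          rw [h1, PySem.List.slice_from_natCast]
        rw [htail]
        have hA1 : PySem.List.slice ws (some (-(k:Int))) none = ws.drop (n - k) := by
          rw [PySem.List.slice_from_neg_natCast ws k (by omega)]
        have hA2 : PySem.List.slice ws (some (-((k:Int)*2))) (some (-(k:Int))) = (ws.drop (n - 2*k)).take k := by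
          have h1 : -((k:Int)*2) = -(((2*k : Nat):Int)) := by omega
          rw [h1, slice_negneg ws (2*k) k (by omega) (by omega) (by omega)]
          congr 1
          omega
        have hblock : PySem.List.slice ws (some (((n:Int) - (k:Int)) - (k:Int))) (some ((n:Int) - (k:Int)))
            = (ws.drop (n - 2*k)).take k := by
          have h1 : ((n:Int) - (k:Int)) - (k:Int) = ((n - 2*k : Nat):Int) := by omega
          have h2 : (n:Int) - (k:Int) = ((n - k : Nat):Int) := by omega
          rw [h1, h2, PySem.List.slice_natCast]
          congr 1
          omega
        have hstopc : ¬ ((k:Int) ≤ (n:Int) - (k:Int) ∧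
            PySem.List.slice ws (some (((n:Int) - (k:Int)) - (k:Int))) (some ((n:Int) - (k:Int))) = ws.drop (n - k)) := by
          intro h
          apply hne
          rw [hA1, hA2, ← h.2, hblock]
        rw [bScan_stop _ ws (ws.drop (n-k)) (k:Int) ((n:Int) - (k:Int)) hstopc]
        rw [PySem.List.slice_to ws (by omega : (0:Int) ≤ (n:Int) - (k:Int) + (k:Int))]
        have h3 : ((n:Int) - (k:Int) + (k:Int)).toNat = n := by omega
        rw [h3, hn, List.take_length]
      · rw [not_not] at hne
        rw [aChop_step f (k:Int) ws (by omega) hne]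
        have hws' : PySem.List.slice ws none (some (-(k:Int))) = ws.take (n - k) := by
          rw [PySem.List.slice_to_neg_natCast ws k (by omega)]
        rw [hws']
        have hlen' : (ws.take (n - k)).length ≤ f := by
          simp [List.length_take]; omega
        rw [ih (ws.take (n - k)) hlen']
        have hC : ws.drop (n - k) = (ws.drop (n - 2*k)).take k := by
          have hA1 : PySem.List.slice ws (some (-(k:Int))) none = ws.drop (n - k) := by
            rw [PySem.List.slice_from_neg_natCast ws k (by omega)]
          have hA2 : PySem.List.slice ws (some (-((k:Int)*2))) (some (-(k:Int))) = (ws.drop (n - 2*k)).take k := by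
            have h1 : -((k:Int)*2) = -(((2*k : Nat):Int)) := by omega
            rw [h1, slice_negneg ws (2*k) k (by omega) (by omega) (by omega)]
            congr 1
            omega
          rw [← hA1, ← hA2, hne]
        exact (step_take ws k hk (by omega) hC).symm
    · rw [aChop_stop (f+1) (k:Int) ws (by omega)]
      rw [stepB]
      simp only [← hn]
      rw [if_neg (by omega)]

-- A's filtered reversed range equals B's countdown range
theorem range_eq (rl : Int) (h0 : 0 ≤ rl) :
    ((PySem.List.pyRange 0 (rl+1) 1).reverse).filter (fun i => decide (i > 1)) = PySem.List.pyRange rl 1 (-1) := by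
  rw [PySem.List.pyRange_neg_one_eq_reverse, List.filter_reverse]
  congr 1
  have h21 : (1:Int) + 1 = 2 := by norm_num
  rw [h21]
  by_cases h : 2 ≤ rl + 1
  · rw [PySem.List.pyRange_one_append 0 2 (rl+1) (by omega) (by omega), List.filter_append]
    have h1 : PySem.List.pyRange 0 2 1 = [0, 1] := by decide
    have h2 : List.filter (fun i => decide (i > 1)) ([0, 1] : List Int) = [] := by decide
    rw [h1, h2, List.nil_append]
    apply List.filter_eq_self.mpr
    intro a ha
    have := PySem.List.mem_pyRange_one.mp ha
    simp only [decide_eq_true_eq]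
    omega
  · rw [PySem.List.pyRange_one_eq_nil (by omega : rl + 1 ≤ 2)]
    rw [List.filter_eq_nil_iff]
    intro a ha
    have := PySem.List.mem_pyRange_one.mp ha
    simp only [decide_eq_true_eq]
    omega

-- ===== VERDICT (by name: the statement is the Claim_ definition above) =====
theorem remove_end_repeats_spec : Claim_equal_remove_end_repeats := by
  intro w _
  show remove_end_repeats w = remove_end_repeats_alt w
  rw [remove_end_repeats, remove_end_repeats_alt]
  have hfd : PySem.Int.floordiv ((w.length:Int)) 2 = ((w.length / 2 : Nat):Int) := by
    exact_mod_cast PySem.Int.floordiv_natCast w.length 2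
  set rl : Int := PySem.Int.floordiv ((w.length:Int)) 2 with hrl
  have h0 : 0 ≤ rl := by rw [hfd]; positivity
  by_cases h : rl > 1
  · rw [if_pos h]
    rw [range_eq rl h0]
    apply PySem.List.foldl_congr_mem
    intro acc x hx
    have hmem := PySem.List.mem_pyRange_neg_one.mp hx
    obtain ⟨kn, rfl⟩ : ∃ kn : Nat, x = (kn:Int) := ⟨x.toNat, by omega⟩
    exact main_chop kn (by omega) acc.length acc le_rfl
  · rw [if_neg h]
    rw [PySem.List.pyRange_neg_one_eq_nil (by omega : rl ≤ 1)]
    rfl
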